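-- pv_equiv track=rewrite | github.com/Xuniverzadmin/agenticverz_2.0 | scripts/ops/layer_validator.py | get_layer_from_path
-- ===== SOURCE A (Python) =====
-- from typing import Dict, List, Optional, Set, Tuple
--
-- HOC_LAYER_PATTERNS = {
--     # L2.1 — API Facades
--     "houseofcards/api/facades/": "L2.1",
--     # L2 — APIs
--     "houseofcards/api/customer/": "L2",
--     "houseofcards/api/founder/": "L2",
--     "houseofcards/api/internal/": "L2",
--     # L3 — Adapters
--     "/adapters/": "L3",
--     # L4 — Runtime (in general/)
--     "/general/runtime/": "L4",
--     # L4 — Domain Facades (facades/ within domain, not api/facades)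
--     # These are L4 because they orchestrate but don't touch HTTP
--     # L5 — Engines, Workers, Schemas
--     "/engines/": "L5",
--     "/workers/": "L5",
--     "/schemas/": "L5",
--     # L6 — Drivers
--     "/drivers/": "L6",
--     # L7 — Models
--     "app/models/": "L7",
--     "app/customer/models/": "L7",
--     "app/founder/models/": "L7",
--     "app/internal/models/": "L7",
-- }
--
-- LEGACY_LAYER_PATTERNS = {
--     "backend/app/api/": "L2",
--     "backend/app/services/": "L4",  # Legacy services treated as L4
--     "backend/app/adapters/": "L3",
--     "backend/app/worker/": "L5",
--     "backend/app/workflow/": "L5",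
--     "backend/app/auth/": "L6",
--     "backend/app/db/": "L6",
--     "backend/app/models/": "L7",
--     "scripts/": "L7",
-- }
--
-- def get_layer_from_path(file_path: str) -> Optional[str]:
--     """Determine layer from file path patterns."""
--     # Check HOC patterns first (more specific)
--     for pattern, layer in sorted(HOC_LAYER_PATTERNS.items(), key=lambda x: -len(x[0])):
--         if pattern in file_path:
--             return layer
--
--     # Check legacy patterns
--     for pattern, layer in sorted(LEGACY_LAYER_PATTERNS.items(), key=lambda x: -len(x[0])):
--         if pattern in file_path:
--             return layer
--
--     return None
-- ===== SOURCE B (Python) =====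
-- from typing import Optional
--
-- HOC_LAYER_PATTERNS = {
--     "houseofcards/api/facades/": "L2.1",
--     "houseofcards/api/customer/": "L2",
--     "houseofcards/api/founder/": "L2",
--     "houseofcards/api/internal/": "L2",
--     "/adapters/": "L3",
--     "/general/runtime/": "L4",
--     "/engines/": "L5",
--     "/workers/": "L5",
--     "/schemas/": "L5",
--     "/drivers/": "L6",
--     "app/models/": "L7",
--     "app/customer/models/": "L7",
--     "app/founder/models/": "L7",
--     "app/internal/models/": "L7",
-- }
--
-- LEGACY_LAYER_PATTERNS = {
--     "backend/app/api/": "L2",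
--     "backend/app/services/": "L4",
--     "backend/app/adapters/": "L3",
--     "backend/app/worker/": "L5",
--     "backend/app/workflow/": "L5",
--     "backend/app/auth/": "L6",
--     "backend/app/db/": "L6",
--     "backend/app/models/": "L7",
--     "scripts/": "L7",
-- }
--
-- def get_layer_from_path(file_path: str) -> Optional[str]:
--     """Determine layer from file path patterns (single linear scan, no sort)."""
--     for patterns in (HOC_LAYER_PATTERNS, LEGACY_LAYER_PATTERNS):
--         best = None
--         best_len = -1
--         for pattern, layer in patterns.items():
--             if pattern in file_path and len(pattern) > best_len:
--                 best = layer
--                 best_len = len(pattern)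
--         if best is not None:
--             return best
--     return None
-- ===== Notes on version B (the rewrite author's own statement) =====
-- stated objective: simpler
-- what changed: Replaced A's sort-the-pattern-dict-by-descending-length-then-return-first-match with a single linear scan per table that tracks the longest matching pattern (strict > keeps the first pattern on length ties, matching the stable sort).
import Mathlib
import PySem

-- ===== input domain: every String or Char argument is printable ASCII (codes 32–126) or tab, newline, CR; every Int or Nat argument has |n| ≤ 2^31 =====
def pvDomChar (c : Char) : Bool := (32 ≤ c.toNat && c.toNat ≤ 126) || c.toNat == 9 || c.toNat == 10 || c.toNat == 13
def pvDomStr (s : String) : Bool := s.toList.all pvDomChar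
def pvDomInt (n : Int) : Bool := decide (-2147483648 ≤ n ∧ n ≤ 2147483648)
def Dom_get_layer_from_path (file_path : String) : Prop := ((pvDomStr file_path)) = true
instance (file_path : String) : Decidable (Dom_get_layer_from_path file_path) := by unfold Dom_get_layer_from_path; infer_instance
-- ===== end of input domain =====

-- B replaces A's per-call sort-then-first-match by a single linear longest-match scan
-- over each pattern table (objective: simpler — no sorting, one pass per table).

-- ===== PORT A =====
-- module constants (dicts of string patterns; iterated as association lists in insertion order)
def HOC_LAYER_PATTERNS : List (String × String) :=
  [("houseofcards/api/facades/", "L2.1"),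
   ("houseofcards/api/customer/", "L2"),
   ("houseofcards/api/founder/", "L2"),
   ("houseofcards/api/internal/", "L2"),
   ("/adapters/", "L3"),
   ("/general/runtime/", "L4"),
   ("/engines/", "L5"),
   ("/workers/", "L5"),
   ("/schemas/", "L5"),
   ("/drivers/", "L6"),
   ("app/models/", "L7"),
   ("app/customer/models/", "L7"),
   ("app/founder/models/", "L7"),
   ("app/internal/models/", "L7")]

def LEGACY_LAYER_PATTERNS : List (String × String) :=
  [("backend/app/api/", "L2"),
   ("backend/app/services/", "L4"),
   ("backend/app/adapters/", "L3"),
   ("backend/app/worker/", "L5"),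
   ("backend/app/workflow/", "L5"),
   ("backend/app/auth/", "L6"),
   ("backend/app/db/", "L6"),
   ("backend/app/models/", "L7"),
   ("scripts/", "L7")]

-- A's for-loop with early return over a pattern list
def pvFirstMatch (file_path : String) : List (String × String) → Option String
  | [] => none
  | (pattern, layer) :: rest =>
      if PySem.Str.isIn pattern file_path then some layer else pvFirstMatch file_path rest

def get_layer_from_path (file_path : String) : Option String :=
  match pvFirstMatch file_path
      (PySem.List.sorted HOC_LAYER_PATTERNS (fun x => -(PySem.Str.len x.1))) with
  | some layer => some layer
  | none =>
    match pvFirstMatch file_path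
        (PySem.List.sorted LEGACY_LAYER_PATTERNS (fun x => -(PySem.Str.len x.1))) with
    | some layer => some layer
    | none => none

-- ===== PORT B =====
-- B's inner loop: track the longest matching pattern's layer (strict > keeps the first tie)
def pvBestScan (file_path : String) (patterns : List (String × String)) : Option String :=
  (patterns.foldl
    (fun (st : Option String × Int) x =>
      if PySem.Str.isIn x.1 file_path && decide (st.2 < PySem.Str.len x.1)
      then (some x.2, PySem.Str.len x.1) else st)
    (none, -1)).1

def get_layer_from_path_alt (file_path : String) : Option String :=
  match pvBestScan file_path HOC_LAYER_PATTERNS with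
  | some best => some best
  | none =>
    match pvBestScan file_path LEGACY_LAYER_PATTERNS with
    | some best => some best
    | none => none

-- ===== PRECONDITION & SPEC =====
def Spec_get_layer_from_path (file_path : String) (out : Option String) : Prop := out = get_layer_from_path_alt file_path
instance (file_path : String) (out : Option String) : Decidable (Spec_get_layer_from_path file_path out) := by unfold Spec_get_layer_from_path; infer_instance

-- ===== CLAIM (what is proved, stated in full; the proofs are below) =====
def Claim_equal_get_layer_from_path : Prop := ∀ (file_path : String), Dom_get_layer_from_path file_path → Spec_get_layer_from_path file_path (get_layer_from_path file_path)

-- ===== LEMMAS AND PROOFS =====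

-- boolean abstractions: the two loops as functions of the match-test results only
def pvFmB : List (Bool × String) → Option String
  | [] => none
  | (b, layer) :: rest => if b then some layer else pvFmB rest

def pvBsB (l : List (Bool × Int × String)) (st : Option String × Int) : Option String × Int :=
  l.foldl (fun st x => if x.1 && decide (st.2 < x.2.1) then (some x.2.2, x.2.1) else st) st

lemma pvFirstMatch_eq (fp : String) (l : List (String × String)) :
    pvFirstMatch fp l = pvFmB (l.map fun x => (PySem.Str.isIn x.1 fp, x.2)) := by
  induction l with
  | nil => rfl
  | cons x rest ih => cases x; simp only [pvFirstMatch, pvFmB, List.map, ih]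

lemma pvBsB_eq (fp : String) (l : List (String × String)) (st : Option String × Int) :
    l.foldl
      (fun (st : Option String × Int) x =>
        if PySem.Str.isIn x.1 fp && decide (st.2 < PySem.Str.len x.1)
        then (some x.2, PySem.Str.len x.1) else st) st
    = pvBsB (l.map fun x => (PySem.Str.isIn x.1 fp, PySem.Str.len x.1, x.2)) st := by
  induction l generalizing st with
  | nil => rfl
  | cons x rest ih => simp only [List.foldl, pvBsB, List.map] at ih ⊢; rw [ih]

lemma pvBestScan_eq (fp : String) (l : List (String × String)) :
    pvBestScan fp l
    = (pvBsB (l.map fun x => (PySem.Str.isIn x.1 fp, PySem.Str.len x.1, x.2)) (none, -1)).1 := by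
  unfold pvBestScan; rw [pvBsB_eq]

-- the stable descending-length sorts of the two literal tables, evaluated
lemma sorted_hoc :
    PySem.List.sorted HOC_LAYER_PATTERNS (fun x => -(PySem.Str.len x.1))
    = [("houseofcards/api/customer/", "L2"),
       ("houseofcards/api/internal/", "L2"),
       ("houseofcards/api/facades/", "L2.1"),
       ("houseofcards/api/founder/", "L2"),
       ("app/customer/models/", "L7"),
       ("app/internal/models/", "L7"),
       ("app/founder/models/", "L7"),
       ("/general/runtime/", "L4"),
       ("app/models/", "L7"),
       ("/adapters/", "L3"),
       ("/engines/", "L5"),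
       ("/workers/", "L5"),
       ("/schemas/", "L5"),
       ("/drivers/", "L6")] := by decide

lemma sorted_legacy :
    PySem.List.sorted LEGACY_LAYER_PATTERNS (fun x => -(PySem.Str.len x.1))
    = [("backend/app/services/", "L4"),
       ("backend/app/adapters/", "L3"),
       ("backend/app/workflow/", "L5"),
       ("backend/app/worker/", "L5"),
       ("backend/app/models/", "L7"),
       ("backend/app/auth/", "L6"),
       ("backend/app/api/", "L2"),
       ("backend/app/db/", "L6"),
       ("scripts/", "L7")] := by decide

-- first match in descending-length order = longest-match scan, for every outcome of the 14 tests
set_option maxRecDepth 100000 in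
set_option maxHeartbeats 4000000 in
lemma hoc_bool : ∀ (b0 b1 b2 b3 b4 b5 b6 b7 b8 b9 b10 b11 b12 b13 : Bool),
    pvFmB [(b1, "L2"), (b3, "L2"), (b0, "L2.1"), (b2, "L2"), (b11, "L7"), (b13, "L7"),
           (b12, "L7"), (b5, "L4"), (b10, "L7"), (b4, "L3"), (b6, "L5"), (b7, "L5"),
           (b8, "L5"), (b9, "L6")]
    = (pvBsB [(b0, 25, "L2.1"), (b1, 26, "L2"), (b2, 25, "L2"), (b3, 26, "L2"),
              (b4, 10, "L3"), (b5, 17, "L4"), (b6, 9, "L5"), (b7, 9, "L5"),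
              (b8, 9, "L5"), (b9, 9, "L6"), (b10, 11, "L7"), (b11, 20, "L7"),
              (b12, 19, "L7"), (b13, 20, "L7")] (none, -1)).1 := by decide

set_option maxRecDepth 100000 in
set_option maxHeartbeats 4000000 in
lemma legacy_bool : ∀ (b0 b1 b2 b3 b4 b5 b6 b7 b8 : Bool),
    pvFmB [(b1, "L4"), (b2, "L3"), (b4, "L5"), (b3, "L5"), (b7, "L7"), (b5, "L6"),
           (b0, "L2"), (b6, "L6"), (b8, "L7")]
    = (pvBsB [(b0, 16, "L2"), (b1, 21, "L4"), (b2, 21, "L3"), (b3, 19, "L5"),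
              (b4, 21, "L5"), (b5, 17, "L6"), (b6, 15, "L6"), (b7, 19, "L7"),
              (b8, 8, "L7")] (none, -1)).1 := by decide

lemma hoc_eq (fp : String) :
    pvFirstMatch fp (PySem.List.sorted HOC_LAYER_PATTERNS (fun x => -(PySem.Str.len x.1)))
    = pvBestScan fp HOC_LAYER_PATTERNS := by
  rw [sorted_hoc, pvFirstMatch_eq, pvBestScan_eq]
  simp only [HOC_LAYER_PATTERNS, List.map]
  exact hoc_bool (PySem.Str.isIn "houseofcards/api/facades/" fp)
    (PySem.Str.isIn "houseofcards/api/customer/" fp)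
    (PySem.Str.isIn "houseofcards/api/founder/" fp)
    (PySem.Str.isIn "houseofcards/api/internal/" fp)
    (PySem.Str.isIn "/adapters/" fp)
    (PySem.Str.isIn "/general/runtime/" fp)
    (PySem.Str.isIn "/engines/" fp)
    (PySem.Str.isIn "/workers/" fp)
    (PySem.Str.isIn "/schemas/" fp)
    (PySem.Str.isIn "/drivers/" fp)
    (PySem.Str.isIn "app/models/" fp)
    (PySem.Str.isIn "app/customer/models/" fp)
    (PySem.Str.isIn "app/founder/models/" fp)
    (PySem.Str.isIn "app/internal/models/" fp)

lemma legacy_eq (fp : String) :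
    pvFirstMatch fp (PySem.List.sorted LEGACY_LAYER_PATTERNS (fun x => -(PySem.Str.len x.1)))
    = pvBestScan fp LEGACY_LAYER_PATTERNS := by
  rw [sorted_legacy, pvFirstMatch_eq, pvBestScan_eq]
  simp only [LEGACY_LAYER_PATTERNS, List.map]
  exact legacy_bool (PySem.Str.isIn "backend/app/api/" fp)
    (PySem.Str.isIn "backend/app/services/" fp)
    (PySem.Str.isIn "backend/app/adapters/" fp)
    (PySem.Str.isIn "backend/app/worker/" fp)
    (PySem.Str.isIn "backend/app/workflow/" fp)
    (PySem.Str.isIn "backend/app/auth/" fp)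
    (PySem.Str.isIn "backend/app/db/" fp)
    (PySem.Str.isIn "backend/app/models/" fp)
    (PySem.Str.isIn "scripts/" fp)

-- ===== VERDICT (by name: the statement is the Claim_ definition above) =====
theorem get_layer_from_path_spec : Claim_equal_get_layer_from_path := by
  intro fp _
  unfold Spec_get_layer_from_path get_layer_from_path get_layer_from_path_alt
  rw [hoc_eq, legacy_eq]
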